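-- pv_equiv track=rewrite | github.com/hergerr/Assembly | Lab3/substring/subs.py | f
-- ===== SOURCE A (Python) =====
-- def f(tab, len2):
--     """Tab to ciag znakow, len1 to len(tab), a len2 to dlugosc poszukiwanego ciagu x"""
--     counter = 0
--     for i in range(0, len(tab)):
--         j = i
--         while tab[j] == 'x':
--             counter += 1
--             if counter == len2:
--                 return i
--             j += 1
--             if (j == len(tab)):
--                 return -1 #dojechalismy do konca
--         counter = 0
--     return -1
-- ===== SOURCE B (Python) =====
-- def f(tab, len2):
--     """Single pass: track the length of the current run of 'x'; return the
--     start index as soon as the run reaches len2."""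
--     if len2 <= 0:
--         return -1
--     run = 0
--     for i, c in enumerate(tab):
--         if c == 'x':
--             run += 1
--             if run == len2:
--                 return i - len2 + 1
--         else:
--             run = 0
--     return -1
-- ===== Notes on version B (the rewrite author's own statement) =====
-- stated objective: simpler
-- what changed: A restarts an inner while-scan at every index, re-reading each run of 'x' once per suffix; B makes a single left-to-right pass keeping only the length of the current run of 'x' and returns its start index the moment the run reaches len2.
import Mathlib
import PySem

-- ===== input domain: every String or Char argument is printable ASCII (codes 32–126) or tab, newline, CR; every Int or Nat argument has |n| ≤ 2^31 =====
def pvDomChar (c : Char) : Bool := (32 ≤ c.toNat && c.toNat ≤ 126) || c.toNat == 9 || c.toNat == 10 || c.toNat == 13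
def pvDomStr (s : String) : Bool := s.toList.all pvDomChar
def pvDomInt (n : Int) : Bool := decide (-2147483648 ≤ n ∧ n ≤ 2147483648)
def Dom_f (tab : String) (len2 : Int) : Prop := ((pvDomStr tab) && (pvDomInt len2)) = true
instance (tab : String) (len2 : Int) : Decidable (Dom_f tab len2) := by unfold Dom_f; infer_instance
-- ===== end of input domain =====

-- B replaces A's nested restart-at-every-index scan by a single left-to-right pass
-- that counts the length of the current run of 'x'.  (objective: simpler)

-- ===== PORT A =====
-- inner `while tab[j] == 'x': …` loop of A (i is the outer index, j the cursor,
-- counter the running count); `some r` = the Python `return r`, `none` = loop ended normally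
def fWhile (s : List Char) (len2 : Int) (i : Nat) (j : Nat) (counter : Int) : Option Int :=
  if h : PySem.List.pyGet? s (j : Int) = some 'x' then
    if counter + 1 = len2 then some (i : Int)
    else if j + 1 = s.length then some (-1)
    else fWhile s len2 i (j + 1) (counter + 1)
  else none
termination_by s.length - j
decreasing_by
  simp only [PySem.List.pyGet?_natCast] at h
  have hj := (List.getElem?_eq_some_iff.mp h).1
  omega

-- outer `for i in range(0, len(tab))` loop; counter is 0 at the top of every iteration
def fOuter (s : List Char) (len2 : Int) (i : Nat) : Int :=
  if i < s.length then
    match fWhile s len2 i i 0 with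
    | some r => r
    | none => fOuter s len2 (i + 1)
  else -1
termination_by s.length - i

def f (tab : String) (len2 : Int) : Int := fOuter tab.toList len2 0

-- ===== PORT B =====
-- single pass over the characters; i = current index, run = length of the run of 'x'
-- ending just before position i
def fAltLoop (len2 : Int) : List Char → Nat → Int → Int
  | [], _, _ => -1
  | c :: rest, i, run =>
    if c = 'x' then
      if run + 1 = len2 then (i : Int) - len2 + 1
      else fAltLoop len2 rest (i + 1) (run + 1)
    else fAltLoop len2 rest (i + 1) 0

def f_alt (tab : String) (len2 : Int) : Int :=
  if len2 ≤ 0 then -1 else fAltLoop len2 tab.toList 0 0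

-- ===== PRECONDITION & SPEC =====
def Spec_f (tab : String) (len2 : Int) (out : Int) : Prop := out = f_alt tab len2
instance (tab : String) (len2 : Int) (out : Int) : Decidable (Spec_f tab len2 out) := by unfold Spec_f; infer_instance

-- ===== CLAIM (what is proved, stated in full; the proofs are below) =====
def Claim_equal_f : Prop := ∀ (tab : String) (len2 : Int), Dom_f tab len2 → Spec_f tab len2 (f tab len2)

-- ===== LEMMAS AND PROOFS =====

-- length of the run of 'x' at the head of l
def runLen (l : List Char) : Nat := (l.takeWhile (fun c => c = 'x')).length

-- index of the first position whose suffix starts with len2 consecutive 'x'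
def firstStart (len2 : Int) : List Char → Option Nat
  | [] => none
  | c :: rest =>
    if len2 ≤ (runLen (c :: rest) : Int) then some 0
    else (firstStart len2 rest).map (· + 1)

theorem runLen_nil : runLen [] = 0 := rfl

theorem firstStart_cons (len2 : Int) (c : Char) (rest : List Char) :
    firstStart len2 (c :: rest) =
      if len2 ≤ (runLen (c :: rest) : Int) then some 0
      else (firstStart len2 rest).map (· + 1) := rfl

theorem fAltLoop_cons (len2 : Int) (c : Char) (rest : List Char) (i : Nat) (run : Int) :
    fAltLoop len2 (c :: rest) i run =
      if c = 'x' then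
        if run + 1 = len2 then (i : Int) - len2 + 1
        else fAltLoop len2 rest (i + 1) (run + 1)
      else fAltLoop len2 rest (i + 1) 0 := rfl

theorem runLen_cons (c : Char) (rest : List Char) :
    runLen (c :: rest) = if c = 'x' then runLen rest + 1 else 0 := by
  by_cases h : c = 'x' <;> simp [runLen, List.takeWhile, h]

theorem runLen_le_length (l : List Char) : runLen l ≤ l.length := by
  induction l with
  | nil => simp [runLen_nil]
  | cons c rest ih => rw [runLen_cons]; split_ifs <;> simp <;> omega

theorem firstStart_none_of_short (len2 : Int) :
    ∀ l : List Char, (l.length : Int) < len2 → firstStart len2 l = none := by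
  intro l
  induction l with
  | nil => intro _; rfl
  | cons c rest ih =>
    intro h
    have hr := runLen_le_length (c :: rest)
    simp only [List.length_cons] at h hr
    push_cast at h
    rw [firstStart_cons, if_neg (by push_cast; omega), ih (by omega)]
    rfl

theorem firstStart_drop_runLen (len2 : Int) :
    ∀ l : List Char, (runLen l : Int) < len2 →
    firstStart len2 l = (firstStart len2 (l.drop (runLen l))).map (· + runLen l) := by
  intro l
  induction l with
  | nil => intro _; rfl
  | cons c rest ih =>
    intro h
    by_cases hc : c = 'x'
    · have hk : runLen (c :: rest) = runLen rest + 1 := by rw [runLen_cons, if_pos hc]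
      have hrest : (runLen rest : Int) < len2 := by rw [hk] at h; push_cast at h; omega
      rw [firstStart_cons, if_neg (by omega), ih hrest, hk]
      simp only [List.drop_succ_cons]
      cases firstStart len2 (rest.drop (runLen rest)) <;> simp <;> omega
    · have hk : runLen (c :: rest) = 0 := by rw [runLen_cons, if_neg hc]
      rw [hk]
      simp only [List.drop_zero]
      cases firstStart len2 (c :: rest) <;> simp

-- characterisation of A's inner while loop
theorem fWhile_eq (s : List Char) (len2 : Int) (i j : Nat) (c : Int) :
    fWhile s len2 i j c =
      if 1 ≤ len2 - c ∧ len2 - c ≤ (runLen (s.drop j) : Int) then some (i : Int)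
      else if 1 ≤ runLen (s.drop j) ∧ j + runLen (s.drop j) = s.length then some (-1)
      else none := by
  fun_induction fWhile with
  | case1 j c h h1 =>
    -- tab[j] == 'x' and counter+1 == len2 : return i
    simp only [PySem.List.pyGet?_natCast] at h
    obtain ⟨hj, hx⟩ := List.getElem?_eq_some_iff.mp h
    have hd : s.drop j = 'x' :: s.drop (j + 1) := by
      rw [List.drop_eq_getElem_cons hj, hx]
    have hk : 1 ≤ runLen (s.drop j) := by rw [hd, runLen_cons]; simp
    rw [if_pos (by constructor <;> omega)]
  | case2 j c h h1 h2 =>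
    -- tab[j] == 'x', counter+1 ≠ len2, j+1 == len : return -1
    simp only [PySem.List.pyGet?_natCast] at h
    obtain ⟨hj, hx⟩ := List.getElem?_eq_some_iff.mp h
    have hd : s.drop j = 'x' :: s.drop (j + 1) := by
      rw [List.drop_eq_getElem_cons hj, hx]
    have hnil : s.drop (j + 1) = [] := List.drop_eq_nil_of_le (by omega)
    have hk : runLen (s.drop j) = 1 := by
      rw [hd, hnil, runLen_cons]; simp [runLen_nil]
    rw [hk, if_neg (by push_cast; omega), if_pos (by omega)]
  | case3 j c h h1 h2 ih =>
    -- tab[j] == 'x', counter+1 ≠ len2, j+1 ≠ len : continue the loop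
    simp only [PySem.List.pyGet?_natCast] at h
    obtain ⟨hj, hx⟩ := List.getElem?_eq_some_iff.mp h
    have hd : s.drop j = 'x' :: s.drop (j + 1) := by
      rw [List.drop_eq_getElem_cons hj, hx]
    have hk : runLen (s.drop j) = runLen (s.drop (j + 1)) + 1 := by
      rw [hd, runLen_cons]; simp
    rw [ih, hk]
    split_ifs <;>
      first
      | rfl
      | (exfalso; omega)
  | case4 j c h =>
    -- tab[j] ≠ 'x' : loop exits normally
    simp only [PySem.List.pyGet?_natCast] at h
    have hk : runLen (s.drop j) = 0 := by
      rcases Nat.lt_or_ge j s.length with hj | hj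
      · have hd : s.drop j = s[j] :: s.drop (j + 1) := List.drop_eq_getElem_cons hj
        have hx : ¬ s[j] = 'x' := fun hx => h (by rw [List.getElem?_eq_some_iff]; exact ⟨hj, hx⟩)
        rw [hd, runLen_cons, if_neg hx]
      · rw [List.drop_eq_nil_of_le hj, runLen_nil]
    rw [hk, if_neg (by push_cast; omega), if_neg (by omega)]

-- characterisation of A's outer loop, for positive len2
theorem fOuter_eq (s : List Char) (len2 : Int) (hlen : 1 ≤ len2) (i : Nat) :
    fOuter s len2 i =
      match firstStart len2 (s.drop i) with
      | some m => ((i + m : Nat) : Int)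
      | none => -1 := by
  fun_induction fOuter with
  | case1 i hi r heq =>
    rw [fWhile_eq] at heq
    have hd : s.drop i = s[i] :: s.drop (i + 1) := List.drop_eq_getElem_cons hi
    split_ifs at heq with a1 a2
    · -- returned some i : len2 ≤ runLen (drop i s)
      injection heq with h'; subst h'
      rw [hd, firstStart_cons, ← hd, if_pos (by omega)]
      simp
    · -- returned -1 : run of 'x' reaches the end of the string
      injection heq with h'; subst h'
      have hlen2 : ¬ len2 ≤ (runLen (s.drop i) : Int) := by omega
      have hshort : ((s.drop (i + 1)).length : Int) < len2 := by
        have h2 : (s.drop (i + 1)).length = s.length - (i + 1) := List.length_drop ..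
        have hk : runLen (s.drop i) = runLen (s.drop (i + 1)) + 1 ∨
            runLen (s.drop i) = 0 := by
          rw [hd, runLen_cons]; split_ifs <;> simp
        have h3 := runLen_le_length (s.drop (i + 1))
        push_cast at *
        omega
      rw [hd, firstStart_cons, ← hd, if_neg hlen2,
        firstStart_none_of_short len2 _ hshort]
      rfl
  | case2 i hi heq ih =>
    rw [fWhile_eq] at heq
    have hd : s.drop i = s[i] :: s.drop (i + 1) := List.drop_eq_getElem_cons hi
    split_ifs at heq with a1 a2
    have hlen2 : ¬ len2 ≤ (runLen (s.drop i) : Int) := by omega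
    rw [ih, hd, firstStart_cons, ← hd, if_neg hlen2]
    cases firstStart len2 (s.drop (i + 1)) <;> simp <;> push_cast <;> ring
  | case3 i hi =>
    rw [List.drop_eq_nil_of_le (by omega)]
    rfl

-- A returns -1 whenever len2 ≤ 0 (counter starts at 0 and only grows)
theorem fOuter_nonpos (s : List Char) (len2 : Int) (hlen : len2 ≤ 0) (i : Nat) :
    fOuter s len2 i = -1 := by
  fun_induction fOuter with
  | case1 i hi r heq =>
    rw [fWhile_eq] at heq
    split_ifs at heq with a1 a2
    · exact absurd a1 (by omega)
    · injection heq with h'; omega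
  | case2 i hi heq ih => exact ih
  | case3 i hi => rfl

-- characterisation of B's single pass
theorem fAltLoop_eq (len2 : Int) :
    ∀ (l : List Char) (i : Nat) (run : Int), 0 ≤ run → run < len2 →
    fAltLoop len2 l i run =
      if len2 - run ≤ (runLen l : Int) then (i : Int) - run
      else
        match firstStart len2 (l.drop (runLen l)) with
        | some m => ((i + runLen l + m : Nat) : Int)
        | none => -1 := by
  intro l
  induction l with
  | nil =>
    intro i run h0 h1
    rw [show fAltLoop len2 [] i run = -1 from rfl,
      if_neg (by rw [runLen_nil]; push_cast; omega)]
    rfl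
  | cons c rest ih =>
    intro i run h0 h1
    by_cases hc : c = 'x'
    · have hk : runLen (c :: rest) = runLen rest + 1 := by rw [runLen_cons, if_pos hc]
      by_cases hhit : run + 1 = len2
      · rw [fAltLoop_cons, if_pos hc, if_pos hhit, hk, if_pos (by push_cast; omega)]
        omega
      · rw [fAltLoop_cons, if_pos hc, if_neg hhit,
          ih (i + 1) (run + 1) (by omega) (by omega), hk]
        simp only [List.drop_succ_cons]
        by_cases hc2 : len2 - (run + 1) ≤ (runLen rest : Int)
        · rw [if_pos hc2, if_pos (by push_cast; omega)]
          push_cast; omega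
        · rw [if_neg hc2, if_neg (by push_cast; omega)]
          cases firstStart len2 (rest.drop (runLen rest)) <;> simp <;> omega
    · have hk : runLen (c :: rest) = 0 := by rw [runLen_cons, if_neg hc]
      have hfs : firstStart len2 (c :: rest) = (firstStart len2 rest).map (· + 1) := by
        rw [firstStart_cons, if_neg (by rw [hk]; push_cast; omega)]
      rw [fAltLoop_cons, if_neg hc, ih (i + 1) 0 le_rfl (by omega), hk]
      simp only [List.drop_zero]
      by_cases hfull : len2 ≤ (runLen rest : Int)
      · -- the run right after c already suffices: firstStart (c :: rest) = some 1
        rw [if_pos (by push_cast; omega), if_neg (by push_cast; omega), hfs]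
        have hne : rest ≠ [] := by
          intro hnil; rw [hnil, runLen_nil] at hfull; push_cast at hfull; omega
        obtain ⟨d, t, rfl⟩ := List.exists_cons_of_ne_nil hne
        rw [firstStart_cons, if_pos hfull]
        simp
      · rw [if_neg (by push_cast; omega), if_neg (by push_cast; omega), hfs,
          firstStart_drop_runLen len2 rest (by omega)]
        cases firstStart len2 (rest.drop (runLen rest)) <;> simp <;> omega

-- ===== VERDICT (by name: the statement is the Claim_ definition above) =====
theorem f_spec : Claim_equal_f := by
  intro tab len2 _
  unfold Spec_f f f_alt
  by_cases h : len2 ≤ 0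
  · rw [if_pos h, fOuter_nonpos _ _ h]
  · rw [if_neg h]
    have hlen : 1 ≤ len2 := by omega
    rw [fOuter_eq _ _ hlen 0, fAltLoop_eq _ _ 0 0 le_rfl (by omega)]
    simp only [List.drop_zero]
    by_cases hfull : len2 ≤ (runLen tab.toList : Int)
    · rw [if_pos (by omega)]
      have hne : tab.toList ≠ [] := by
        intro hnil; rw [hnil, runLen_nil] at hfull; push_cast at hfull; omega
      obtain ⟨d, t, heq⟩ := List.exists_cons_of_ne_nil hne
      rw [heq] at hfull ⊢
      rw [firstStart_cons, if_pos hfull]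
      simp
    · rw [if_neg (by omega), firstStart_drop_runLen len2 _ (by omega)]
      cases firstStart len2 (tab.toList.drop (runLen tab.toList)) <;> simp <;> push_cast <;> ring
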